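-- pv_equiv track=rewrite | github.com/zinzo1019/Algorithm | 프로그래머스/2/42842. 카펫/카펫.py | get_combination_list
-- ===== SOURCE A (Python) =====
-- def get_combination_list(num):
--     combi_list = []
--     if num == 1:
--         return [[1, 1]]
--
--     for i in range(1, num+1):
--         if num % i == 0:
--             combi = [i, num//i]
--             combi_list.append(combi)
--     return combi_list[len(combi_list)//2:]
-- ===== SOURCE B (Python) =====
-- def get_combination_list(num):
--     # enumerate only the small divisor j <= sqrt(num); each gives the pair
--     # [num//j, j]; reversing the collected list yields the larger half of
--     # A's ascending pair list.
--     big = []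
--     j = 1
--     while j * j <= num:
--         if num % j == 0:
--             big.append([num // j, j])
--         j += 1
--     return big[::-1]
-- ===== Notes on version B (the rewrite author's own statement) =====
-- stated objective: faster
-- what changed: Instead of scanning all i in 1..num and slicing off the second half of the divisor-pair list, B enumerates only the small divisors j with j*j <= num, builds the pair [num//j, j] for each, and reverses the collected list.
import Mathlib
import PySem

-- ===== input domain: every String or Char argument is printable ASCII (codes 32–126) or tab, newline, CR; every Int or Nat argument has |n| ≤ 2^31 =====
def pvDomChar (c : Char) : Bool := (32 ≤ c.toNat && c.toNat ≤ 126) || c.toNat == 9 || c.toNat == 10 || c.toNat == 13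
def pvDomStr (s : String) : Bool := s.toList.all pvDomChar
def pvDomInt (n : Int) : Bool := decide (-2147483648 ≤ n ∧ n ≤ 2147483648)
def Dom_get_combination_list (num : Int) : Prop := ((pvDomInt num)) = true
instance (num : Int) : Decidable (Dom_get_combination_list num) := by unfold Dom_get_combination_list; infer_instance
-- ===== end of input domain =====

-- B replaces A's scan over all of 1..num followed by a half-slice with a scan of
-- the small divisors j (j*j ≤ num) only, collecting [num//j, j] and reversing.

-- ===== PORT A =====
def get_combination_list (num : Int) : List (List Int) :=
  if num = 1 then [[1, 1]]
  else
    let combi_list := (PySem.List.pyRange 1 (num + 1) 1).foldl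
      (fun acc i => if PySem.Int.mod num i = 0 then acc ++ [[i, PySem.Int.floordiv num i]] else acc) []
    PySem.List.slice combi_list (some (PySem.Int.floordiv (combi_list.length : Int) 2)) none

-- ===== PORT B =====
-- the while loop of Source B: j counts up while j*j <= num
def pvAltLoop (num : Int) (j : Nat) (big : List (List Int)) : List (List Int) :=
  if (j : Int) * (j : Int) ≤ num then
    pvAltLoop num (j + 1)
      (if PySem.Int.mod num (j : Int) = 0 then big ++ [[PySem.Int.floordiv num (j : Int), (j : Int)]] else big)
  else big
termination_by num.toNat + 1 - j
decreasing_by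
  rename_i h
  rcases Nat.eq_zero_or_pos j with h0 | h0
  · subst h0; omega
  · have h1 : (j : Int) ≤ (j : Int) * (j : Int) := by
      have := Nat.le_mul_of_pos_left j h0
      exact_mod_cast this
    have h2 : (j : Int) ≤ num := le_trans h1 h
    omega

def get_combination_list_alt (num : Int) : List (List Int) :=
  (pvAltLoop num 1 []).reverse

-- ===== PRECONDITION & SPEC =====
def Spec_get_combination_list (num : Int) (out : List (List Int)) : Prop := out = get_combination_list_alt num
instance (num : Int) (out : List (List Int)) : Decidable (Spec_get_combination_list num out) := by unfold Spec_get_combination_list; infer_instance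

-- ===== CLAIM (what is proved, stated in full; the proofs are below) =====
def Claim_equal_get_combination_list : Prop := ∀ (num : Int), Dom_get_combination_list num → Spec_get_combination_list num (get_combination_list num)

-- ===== LEMMAS AND PROOFS =====

-- the ascending list of divisors of n
def pvDivs (n : Nat) : List Nat := (List.range' 1 n).filter (fun d => n % d == 0)

theorem pv_mem_divs {n d : Nat} (hn : 1 ≤ n) : d ∈ pvDivs n ↔ 1 ≤ d ∧ d ∣ n := by
  unfold pvDivs
  simp only [List.mem_filter, List.mem_range'_1, beq_iff_eq]
  constructor
  · rintro ⟨⟨h1, _⟩, h3⟩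
    exact ⟨h1, Nat.dvd_of_mod_eq_zero h3⟩
  · rintro ⟨h1, h2⟩
    have h3 := Nat.le_of_dvd (by omega) h2
    exact ⟨⟨h1, by omega⟩, Nat.dvd_iff_mod_eq_zero.mp h2⟩

theorem pv_divs_pairwise (n : Nat) : (pvDivs n).Pairwise (· < ·) :=
  (List.pairwise_lt_range' ..).filter _

-- two strictly increasing lists with the same members are equal
theorem pv_pw_eq {l1 l2 : List Nat} (h1 : l1.Pairwise (· < ·)) (h2 : l2.Pairwise (· < ·))
    (h : ∀ x, x ∈ l1 ↔ x ∈ l2) : l1 = l2 := by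
  apply List.Perm.eq_of_pairwise (le := (· ≤ ·))
  · exact fun a b _ _ hab hba => le_antisymm hab hba
  · exact h1.imp (fun h => le_of_lt h)
  · exact h2.imp (fun h => le_of_lt h)
  · exact List.perm_of_nodup_nodup_toFinset_eq h1.nodup h2.nodup (by ext x; simp [h])

-- d ↦ n / d reverses the divisor list
-- n/b < n/a for divisors a < b of n
theorem pv_div_anti {n a b : Nat} (hn : 1 ≤ n) (_ha1 : 1 ≤ a) (ha : a ∣ n) (hb1 : 1 ≤ b)
    (hb : b ∣ n) (hab : a < b) : n / b < n / a := by
  have hae : n / a * a = n := Nat.div_mul_cancel ha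
  have hbe : n / b * b = n := Nat.div_mul_cancel hb
  have hbpos : 0 < n / b := Nat.div_pos (Nat.le_of_dvd (by omega) hb) (by omega)
  by_contra hc
  rw [Nat.not_lt] at hc
  nlinarith

theorem pv_divs_symm {n : Nat} (hn : 1 ≤ n) :
    (pvDivs n).reverse.map (fun d => n / d) = pvDivs n := by
  apply pv_pw_eq
  · rw [List.pairwise_map, List.pairwise_reverse]
    have := (List.Pairwise.and_mem.mp (pv_divs_pairwise n))
    apply this.imp
    intro a b hab
    obtain ⟨hma, hmb, hlt⟩ := hab
    obtain ⟨ha1, hda⟩ := (pv_mem_divs hn).mp hma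
    obtain ⟨hb1, hdb⟩ := (pv_mem_divs hn).mp hmb
    exact pv_div_anti hn ha1 hda hb1 hdb hlt
  · exact pv_divs_pairwise n
  · intro x
    simp only [List.mem_map, List.mem_reverse]
    constructor
    · rintro ⟨d, hd, rfl⟩
      obtain ⟨hd1, hdd⟩ := (pv_mem_divs hn).mp hd
      refine (pv_mem_divs hn).mpr ⟨Nat.div_pos (Nat.le_of_dvd (by omega) hdd) (by omega),
        Nat.div_dvd_of_dvd hdd⟩
    · intro hx
      obtain ⟨hx1, hxd⟩ := (pv_mem_divs hn).mp hx
      refine ⟨n / x, (pv_mem_divs hn).mpr ⟨Nat.div_pos (Nat.le_of_dvd (by omega) hxd) (by omega),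
        Nat.div_dvd_of_dvd hxd⟩, Nat.div_div_self hxd (by omega)⟩

-- the small-divisor count equals the large-divisor count
-- for a divisor d of n, comparisons of d*d with n mirror comparisons of (n/d)*(n/d)
theorem pv_sq_lt {n d : Nat} (hn : 1 ≤ n) (hd : 1 ≤ d) (hdvd : d ∣ n) :
    n < (n / d) * (n / d) ↔ d * d < n := by
  have he : n / d * d = n := Nat.div_mul_cancel hdvd
  have he1 : 0 < n / d := Nat.div_pos (Nat.le_of_dvd (by omega) hdvd) (by omega)
  constructor
  · intro h
    by_contra hc
    rw [Nat.not_lt] at hc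
    nlinarith
  · intro h
    by_contra hc
    rw [Nat.not_lt] at hc
    nlinarith

theorem pv_sq_le {n d : Nat} (hn : 1 ≤ n) (hd : 1 ≤ d) (hdvd : d ∣ n) :
    n ≤ (n / d) * (n / d) ↔ d * d ≤ n := by
  have h1 := pv_sq_lt (d := n / d) hn (Nat.div_pos (Nat.le_of_dvd (by omega) hdvd) (by omega))
    (Nat.div_dvd_of_dvd hdvd)
  rw [Nat.div_div_self hdvd (by omega)] at h1
  omega

theorem pv_count_eq {n : Nat} (hn : 1 ≤ n) :
    (pvDivs n).countP (fun d => decide (d * d < n)) = (pvDivs n).countP (fun d => decide (n < d * d)) := by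
  conv_rhs => rw [← pv_divs_symm hn]
  rw [List.countP_map, List.countP_reverse]
  apply List.countP_congr
  intro d hd
  obtain ⟨hd1, hdd⟩ := (pv_mem_divs hn).mp hd
  simp only [Function.comp_apply, decide_eq_true_eq]
  exact (pv_sq_lt hn hd1 hdd).symm

-- at most one divisor squares to n
theorem pv_count_sq {n : Nat} :
    (pvDivs n).countP (fun d => decide (d * d = n)) ≤ 1 := by
  rw [List.countP_eq_length_filter]
  have hpw : ((pvDivs n).filter (fun d => decide (d * d = n))).Pairwise (· < ·) :=
    (pv_divs_pairwise n).filter _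
  rcases hF : (pvDivs n).filter (fun d => decide (d * d = n)) with _ | ⟨x, _ | ⟨y, t⟩⟩
  · simp
  · simp
  · exfalso
    rw [hF] at hpw
    have hxy : x < y := (List.pairwise_cons.mp hpw).1 y (by simp)
    have hx : x ∈ (pvDivs n).filter (fun d => decide (d * d = n)) := by rw [hF]; simp
    have hy : y ∈ (pvDivs n).filter (fun d => decide (d * d = n)) := by rw [hF]; simp
    have hx2 : x * x = n := by simpa using (List.mem_filter.mp hx).2
    have hy2 : y * y = n := by simpa using (List.mem_filter.mp hy).2
    nlinarith

-- a strictly increasing list splits at an upward-closed threshold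
theorem pv_split (l : List Nat) (p : Nat → Bool) (hl : l.Pairwise (· < ·))
    (hmono : ∀ a b, a ∈ l → b ∈ l → a ≤ b → p a = false → p b = false) :
    l = l.filter p ++ l.filter (fun a => !p a) := by
  induction l with
  | nil => simp
  | cons a l ih =>
    obtain ⟨hhead, htail⟩ := List.pairwise_cons.mp hl
    cases hpa : p a with
    | true =>
      rw [List.filter_cons_of_pos (by simp [hpa]), List.filter_cons_of_neg (by simp [hpa]),
        List.cons_append]
      congr 1
      exact ih htail (fun x y hx hy hxy hpx => hmono x y (by simp [hx]) (by simp [hy]) hxy hpx)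
    | false =>
      have hall : ∀ b ∈ l, p b = false := fun b hb =>
        hmono a b (by simp) (by simp [hb]) (le_of_lt (hhead b hb)) hpa
      have h1 : (a :: l).filter p = [] := by
        rw [List.filter_eq_nil_iff]
        intro b hb
        rcases List.mem_cons.mp hb with rfl | hb
        · simp [hpa]
        · simp [hall b hb]
      have h2 : (a :: l).filter (fun a => !p a) = a :: l := by
        rw [List.filter_eq_self]
        intro b hb
        rcases List.mem_cons.mp hb with rfl | hb
        · simp [hpa]
        · simp [hall b hb]
      rw [h1, h2, List.nil_append]

-- dropping half the divisor list keeps exactly the divisors with n ≤ d*d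
-- counting split of n ≤ d*d into n < d*d and d*d = n
theorem pv_countP_split {l : List Nat} {n : Nat} :
    l.countP (fun d => decide (n ≤ d * d)) =
      l.countP (fun d => decide (n < d * d)) + l.countP (fun d => decide (d * d = n)) := by
  induction l with
  | nil => simp
  | cons a l ih =>
    simp only [List.countP_cons, ih]
    by_cases h1 : n ≤ a * a
    · by_cases h2 : n < a * a
      · rw [decide_eq_true h1, decide_eq_true h2, decide_eq_false (show ¬(a * a = n) by omega)]
        norm_num
        omega
      · rw [decide_eq_true h1, decide_eq_false h2, decide_eq_true (show a * a = n by omega)]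
        norm_num
        omega
    · rw [decide_eq_false h1, decide_eq_false (show ¬(n < a * a) by omega),
        decide_eq_false (show ¬(a * a = n) by omega)]
      norm_num

theorem pv_drop_half {n : Nat} (hn : 1 ≤ n) :
    (pvDivs n).drop ((pvDivs n).length / 2) = (pvDivs n).filter (fun d => decide (n ≤ d * d)) := by
  have hsplit := pv_split (pvDivs n) (fun d => decide (d * d < n)) (pv_divs_pairwise n)
    (by
      intro a b _ _ hab hpa
      simp only [decide_eq_false_iff_not, Nat.not_lt] at hpa ⊢
      have := Nat.mul_le_mul hab hab
      omega)
  have hq : (pvDivs n).filter (fun a => !(fun d => decide (d * d < n)) a)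
      = (pvDivs n).filter (fun d => decide (n ≤ d * d)) := by
    apply List.filter_congr
    intro d _
    simp only [← decide_not, decide_eq_decide]
    omega
  rw [hq] at hsplit
  have e1 := pv_count_eq hn
  have e2 := pv_count_sq (n := n)
  have e3 := pv_countP_split (l := pvDivs n) (n := n)
  have hk : ((pvDivs n).filter (fun d => decide (d * d < n))).length
      = (pvDivs n).countP (fun d => decide (d * d < n)) := List.countP_eq_length_filter.symm
  have hb : ((pvDivs n).filter (fun d => decide (n ≤ d * d))).length
      = (pvDivs n).countP (fun d => decide (n ≤ d * d)) := List.countP_eq_length_filter.symm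
  set fp := (pvDivs n).filter (fun d => decide (d * d < n)) with hfp
  set fq := (pvDivs n).filter (fun d => decide (n ≤ d * d)) with hfq
  have hlen0 : (pvDivs n).length = fp.length + fq.length := by
    conv_lhs => rw [hsplit]
    rw [List.length_append]
  have hhalf : (pvDivs n).length / 2 = fp.length := by omega
  rw [hhalf]
  conv_lhs => rw [hsplit]
  exact List.drop_left

theorem pv_range_cast (n : Nat) :
    PySem.List.pyRange 1 ((n : Int) + 1) 1 = (List.range' 1 n).map (fun d : Nat => (d : Int)) := by
  rw [PySem.List.pyRange_one]
  have h1 : ((n : Int) + 1 - 1).toNat = n := by omega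
  rw [h1, List.range'_eq_map_range, List.map_map]
  apply List.map_congr_left
  intro k _
  simp only [Function.comp_apply]
  push_cast
  ring

-- characterisation of B's loop
theorem pv_altLoop_char (n : Nat) : ∀ (k j : Nat) (big : List (List Int)), 1 ≤ j → n + 1 - j ≤ k →
    pvAltLoop (n : Int) j big = big ++
      ((List.range' j (n + 1 - j)).filter (fun d => decide (d * d ≤ n) && (n % d == 0))).map
        (fun d : Nat => [(↑(n / d) : Int), (d : Int)]) := by
  intro k
  induction k with
  | zero =>
    intro j big hj hk
    have hcond : ¬ ((j : Int) * (j : Int) ≤ (n : Int)) := by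
      intro hc
      have h2 : j * j ≤ n := by exact_mod_cast hc
      have h3 : j ≤ j * j := Nat.le_mul_of_pos_left j (by omega)
      omega
    rw [pvAltLoop, if_neg hcond]
    have h0 : n + 1 - j = 0 := by omega
    rw [h0]
    simp
  | succ k ih =>
    intro j big hj hk
    by_cases hcond : j * j ≤ n
    · have hjn : j ≤ n := le_trans (Nat.le_mul_of_pos_left j (by omega)) hcond
      rw [pvAltLoop, if_pos (by exact_mod_cast hcond)]
      rw [ih (j + 1) _ (by omega) (by omega)]
      have hr : n + 1 - j = (n + 1 - (j + 1)) + 1 := by omega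
      conv_rhs => rw [hr, List.range'_succ]
      by_cases hmod : n % j = 0
      · have hmodI : PySem.Int.mod (n : Int) (j : Int) = 0 := by
          rw [PySem.Int.mod_natCast]
          exact_mod_cast hmod
        rw [if_pos hmodI]
        rw [List.filter_cons_of_pos (by simp [hcond, hmod])]
        simp [List.append_assoc]
      · have hmodI : ¬ PySem.Int.mod (n : Int) (j : Int) = 0 := by
          rw [PySem.Int.mod_natCast]
          exact_mod_cast hmod
        rw [if_neg hmodI]
        rw [List.filter_cons_of_neg (by simp [hmod])]
    · rw [pvAltLoop, if_neg (by intro hc; exact hcond (by exact_mod_cast hc))]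
      have hnil : ((List.range' j (n + 1 - j)).filter
          (fun d => decide (d * d ≤ n) && (n % d == 0))) = [] := by
        rw [List.filter_eq_nil_iff]
        intro d hd
        have hjd : j ≤ d := (List.mem_range'_1.mp hd).1
        have hdd : ¬ d * d ≤ n := fun h => hcond (le_trans (Nat.mul_le_mul hjd hjd) h)
        simp [hdd]
      rw [hnil]
      simp

theorem pv_alt_char (n : Nat) :
    get_combination_list_alt (n : Int) =
      (((pvDivs n).filter (fun d => decide (d * d ≤ n))).map
        (fun d : Nat => [(↑(n / d) : Int), (d : Int)])).reverse := by
  unfold get_combination_list_alt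
  rw [pv_altLoop_char n n 1 [] (by omega) (by omega)]
  rw [List.nil_append]
  unfold pvDivs
  rw [List.filter_filter]
  rw [Nat.add_sub_cancel]

theorem pv_a_char {n : Nat} (hn : 1 ≤ n) :
    get_combination_list (n : Int) =
      ((pvDivs n).filter (fun d => decide (n ≤ d * d))).map
        (fun d : Nat => [(d : Int), (↑(n / d) : Int)]) := by
  by_cases h1 : n = 1
  · subst h1
    decide
  · simp only [get_combination_list]
    rw [if_neg (by intro hc; exact h1 (by exact_mod_cast hc))]
    rw [pv_range_cast, PySem.List.foldl_append_ite, List.nil_append, List.filter_map]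
    have hfc : ((List.range' 1 n).filter
        ((fun i => decide (PySem.Int.mod (n : Int) i = 0)) ∘ (fun d : Nat => (d : Int)))) = pvDivs n := by
      unfold pvDivs
      apply List.filter_congr
      intro d _
      simp only [Function.comp_apply, PySem.Int.mod_natCast]
      rw [Bool.eq_iff_iff]
      simp [Int.natCast_dvd_natCast, Nat.dvd_iff_mod_eq_zero]
    rw [hfc, List.map_map]
    have hF : ((fun i => [i, PySem.Int.floordiv (n : Int) i]) ∘ fun d : Nat => (d : Int))
        = (fun d : Nat => [(d : Int), (↑(n / d) : Int)]) := by
      funext d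
      simp [PySem.Int.floordiv_natCast]
    rw [hF]
    have hlen : (((pvDivs n).map (fun d : Nat => [(d : Int), (↑(n / d) : Int)])).length : Int)
        = ((pvDivs n).length : Int) := by simp
    rw [hlen]
    have hfd : PySem.Int.floordiv (((pvDivs n).length : Nat) : Int) 2
        = (((pvDivs n).length / 2 : Nat) : Int) := by
      exact_mod_cast PySem.Int.floordiv_natCast (pvDivs n).length 2
    rw [hfd, PySem.List.slice_from _ (Int.natCast_nonneg _), Int.toNat_natCast, ← List.map_drop,
      pv_drop_half hn]

theorem pv_pos_case {n : Nat} (hn : 1 ≤ n) :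
    get_combination_list (n : Int) = get_combination_list_alt (n : Int) := by
  rw [pv_a_char hn, pv_alt_char n, ← List.map_reverse]
  have hL : (pvDivs n).filter (fun d => decide (n ≤ d * d))
      = (((pvDivs n).filter (fun d => decide (d * d ≤ n))).reverse).map (fun d => n / d) := by
    conv_lhs => rw [← pv_divs_symm hn]
    rw [List.filter_map, List.filter_reverse]
    congr 2
    apply List.filter_congr
    intro d hd
    obtain ⟨hd1, hdd⟩ := (pv_mem_divs hn).mp hd
    simp only [Function.comp_apply, decide_eq_decide]
    exact pv_sq_le hn hd1 hdd
  rw [hL, List.map_map]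
  apply List.map_congr_left
  intro d hd
  obtain ⟨hd1, hdd⟩ := (pv_mem_divs hn).mp (List.mem_filter.mp (List.mem_reverse.mp hd)).1
  simp only [Function.comp_apply]
  rw [Nat.div_div_self hdd (by omega)]

theorem pv_nonpos_case {num : Int} (h : num ≤ 0) :
    get_combination_list num = get_combination_list_alt num := by
  have h1 : get_combination_list num = [] := by
    simp only [get_combination_list]
    rw [if_neg (by omega), PySem.List.pyRange_one_eq_nil (by omega)]
    simp only [List.foldl_nil]
    have h0 : PySem.Int.floordiv ((([] : List (List Int)).length : Nat) : Int) 2 = 0 := by decide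
    rw [h0, PySem.List.slice_from _ (le_refl 0)]
    simp
  have h2 : get_combination_list_alt num = [] := by
    unfold get_combination_list_alt
    rw [pvAltLoop, if_neg (by simp; omega)]
    simp
  rw [h1, h2]

-- ===== VERDICT (by name: the statement is the Claim_ definition above) =====
theorem get_combination_list_spec : Claim_equal_get_combination_list := by
  intro num _
  unfold Spec_get_combination_list
  rcases (by omega : num ≤ 0 ∨ 0 < num) with h | h
  · exact pv_nonpos_case h
  · have hn : num = ((num.toNat : Nat) : Int) := by omega
    rw [hn]
    exact pv_pos_case (by omega)
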